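-- pv_equiv track=rewrite | github.com/LuisGiraldo86/project-euler | project_euler/euler_14.py | max_lengths
-- ===== SOURCE A (Python) =====
-- def length_collatz_seq(N, stop):
--
--     count = 0
--     while N >1 and N>stop:
--         quot, rem = divmod(N,2)
--         if rem==0:
--             N=quot
--             count+=1
--         else:
--             N=(3*N+1)//2
--             count+=2
--     return count, N
--
-- def collatz_lengths(N):
--
--     lst = [0,1]
--     for k in range(2, N+1):
--         if k%2==0:
--             lst.append(lst[k//2]+1)
--         else:
--             length, n = length_collatz_seq(k, k-1)
--             lst.append(length+lst[n])
--     return lst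
--
-- def max_lengths(N):
--
--     collatz_len = collatz_lengths(N)
--     lst_n = [0]
--     max_length = 1
--     for k in range(1, len(collatz_len)):
--         if collatz_len[k]==max_length: lst_n.append(k)
--         elif collatz_len[k]>max_length:
--             lst_n.append(k)
--             max_length = collatz_len[k]
--         else: continue
--     return lst_n
-- ===== SOURCE B (Python) =====
-- def max_lengths(N):
--     memo = [0] * (max(N, 1) + 1)
--     memo[1] = 1
--     res = [0, 1]
--     best = 1
--     for k in range(2, N + 1):
--         path = []
--         n = k
--         while n > N or memo[n] == 0:
--             path.append(n)
--             n = n // 2 if n % 2 == 0 else 3 * n + 1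
--         c = memo[n]
--         for n in reversed(path):
--             c += 1
--             if n <= N:
--                 memo[n] = c
--         if c >= best:
--             res.append(k)
--             best = c
--     return res
-- ===== Notes on version B (the rewrite author's own statement) =====
-- stated objective: alternative
-- what changed: B replaces A's bottom-up table built with the even-halving/odd-compressed-loop recurrence plus a separate running-max pass by one fused pass that, for each k, walks the Collatz chain collecting the not-yet-memoized path, assigns lengths back along that path into a dictionary memo, and keeps the running maximum with ties on the fly.
import Mathlib
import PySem

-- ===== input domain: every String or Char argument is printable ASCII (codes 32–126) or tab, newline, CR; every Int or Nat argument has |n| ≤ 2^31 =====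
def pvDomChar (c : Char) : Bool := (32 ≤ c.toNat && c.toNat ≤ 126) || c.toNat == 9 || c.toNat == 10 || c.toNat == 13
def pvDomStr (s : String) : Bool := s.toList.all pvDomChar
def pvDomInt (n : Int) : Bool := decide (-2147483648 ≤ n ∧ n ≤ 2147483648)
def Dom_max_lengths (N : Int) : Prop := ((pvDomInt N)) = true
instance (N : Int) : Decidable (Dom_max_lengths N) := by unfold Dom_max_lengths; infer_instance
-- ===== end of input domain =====

-- B replaces A's bottom-up even/odd-shortcut table + separate running-max pass by one fused
-- pass that walks each k's Collatz chain collecting the unmemoized path and assigns lengths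
-- back along it into a capped memo array, keeping the running maximum with ties; equal cost.
-- Both Pythons run unbounded while-loops, so both ports carry the same totality (fuel) guard:
-- if some chain from 2..N exceeds pvFuel steps, both ports return [] (the Pythons just keep looping).

-- ===== PORT A =====
-- shared totality guard (a fuel bound only; part of neither algorithm)
def pvFuel : Nat := 1000000
def pvCollatzNext (n : Int) : Int :=
  if PySem.Int.mod n 2 == 0 then PySem.Int.floordiv n 2 else 3 * n + 1
def pvHalts : Nat → Int → Bool
  | 0, n => decide (n ≤ 1)
  | f+1, n => if 1 < n then pvHalts f (pvCollatzNext n) else true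
def pvGuard (N : Int) : Bool := (PySem.List.pyRange 2 (N + 1) 1).all (fun k => pvHalts pvFuel k)

-- length_collatz_seq: the while-loop, fueled (on exhaustion it returns the current state)
def lcsA : Nat → Int → Int → Int → Int × Int
  | 0, n, _, cnt => (cnt, n)
  | f+1, n, stop, cnt =>
    if 1 < n ∧ stop < n then
      if PySem.Int.mod n 2 == 0 then lcsA f (PySem.Int.floordiv n 2) stop (cnt + 1)
      else lcsA f (PySem.Int.floordiv (3 * n + 1) 2) stop (cnt + 2)
    else (cnt, n)

-- collatz_lengths loop body (indices lst[k//2] and lst[n] are provably in range, hence pyGetD)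
def clStepA (lst : List Int) (k : Int) : List Int :=
  if PySem.Int.mod k 2 == 0 then
    lst ++ [PySem.List.pyGetD lst (PySem.Int.floordiv k 2) 0 + 1]
  else
    lst ++ [(lcsA pvFuel k (k - 1) 0).1 + PySem.List.pyGetD lst (lcsA pvFuel k (k - 1) 0).2 0]

def clA (N : Int) : List Int := (PySem.List.pyRange 2 (N + 1) 1).foldl clStepA [0, 1]

-- body of max_lengths' loop over k in range(1, len(collatz_len))
def maxStepA (cl : List Int) (st : List Int × Int) (k : Int) : List Int × Int :=
  if PySem.List.pyGetD cl k 0 == st.2 then (st.1 ++ [k], st.2)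
  else if PySem.List.pyGetD cl k 0 > st.2 then (st.1 ++ [k], PySem.List.pyGetD cl k 0)
  else st

def max_lengths (N : Int) : List Int :=
  if pvGuard N then
    let cl := clA N
    ((PySem.List.pyRange 1 (cl.length : Int) 1).foldl (maxStepA cl) ([0], 1)).1
  else []

-- ===== PORT B =====
-- the search while-loop: walk the chain, collecting the path, until a value whose length
-- is already recorded (fuel guard: on exhaustion it returns the current state); the memo
-- list is an Array, indexed with toNat (every index read is nonnegative and in range
-- under the fuel guard, where Python reads it too)
def findB : Nat → Int → Array Int → Int → List Int → List Int × Int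
  | 0, _, _, n, path => (path, n)
  | f+1, bnd, memo, n, path =>
    if bnd < n ∨ memo.getD n.toNat 0 = 0 then findB f bnd memo (pvCollatzNext n) (path ++ [n])
    else (path, n)

-- 'for n in reversed(path): c += 1; if n <= N: memo[n] = c' — iteration over path.reverse;
-- setIfInBounds: the write is in range whenever 1 ≤ n ≤ N
def assignB : List Int → Int → Array Int → Int → Array Int × Int
  | [], _, memo, c => (memo, c)
  | n :: rest, bnd, memo, c =>
    assignB rest bnd (if n ≤ bnd then memo.setIfInBounds n.toNat (c + 1) else memo) (c + 1)

-- one iteration of B's for-loop ('c = memo[n]' is in range when the search exited by a hit)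
def bStep (bnd : Int) (st : Array Int × List Int × Int) (k : Int) :
    Array Int × List Int × Int :=
  let pr := findB pvFuel bnd st.1 k []
  let ac := assignB pr.1.reverse bnd st.1 (st.1.getD pr.2.toNat 0)
  if ac.2 ≥ st.2.2 then (ac.1, st.2.1 ++ [k], ac.2) else (ac.1, st.2.1, st.2.2)

def max_lengths_alt (N : Int) : List Int :=
  if pvGuard N then
    ((PySem.List.pyRange 2 (N + 1) 1).foldl (bStep N)
      ((Array.replicate ((max N 1).toNat + 1) 0).setIfInBounds 1 1, [0, 1], 1)).2.1
  else []

-- ===== PRECONDITION & SPEC =====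
def Spec_max_lengths (N : Int) (out : List Int) : Prop := out = max_lengths_alt N
instance (N : Int) (out : List Int) : Decidable (Spec_max_lengths N out) := by unfold Spec_max_lengths; infer_instance

-- ===== CLAIM (what is proved, stated in full; the proofs are below) =====
def Claim_equal_max_lengths : Prop := ∀ (N : Int), Dom_max_lengths N → Spec_max_lengths N (max_lengths N)

-- ===== LEMMAS AND PROOFS =====

-- proof-side naive chain length (counts the terms of the chain of n, starting count c)
def chainB : Nat → Int → Int → Int
  | 0, _, c => c
  | f+1, n, c => if 1 < n then chainB f (pvCollatzNext n) (c + 1) else c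

-- canonical chain length at full fuel
def LB (n : Int) : Int := chainB pvFuel n 1

lemma chainB_shift : ∀ (f : Nat) (n c : Int), chainB f n c = chainB f n 0 + c := by
  intro f
  induction f with
  | zero => intro n c; simp [chainB]
  | succ f ih =>
    intro n c
    by_cases h : 1 < n
    · simp only [chainB, if_pos h]
      rw [ih _ (c + 1), ih _ (0 + 1)]
      ring
    · simp [chainB, if_neg h]

lemma pvCollatzNext_even {n : Int} (he : PySem.Int.mod n 2 = 0) :
    pvCollatzNext n = PySem.Int.floordiv n 2 := by
  unfold pvCollatzNext
  rw [he]
  rfl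

lemma pvCollatzNext_odd {n : Int} (ho : PySem.Int.mod n 2 ≠ 0) :
    pvCollatzNext n = 3 * n + 1 := by
  unfold pvCollatzNext
  rw [if_neg (by simpa using ho)]

lemma pvHalts_step (f : Nat) {n : Int} (h1 : 1 < n) :
    pvHalts (f + 1) n = pvHalts f (pvCollatzNext n) := by
  simp only [pvHalts, if_pos h1]

lemma chainB_step (f : Nat) {n : Int} (h1 : 1 < n) (c : Int) :
    chainB (f + 1) n c = chainB f (pvCollatzNext n) (c + 1) := by
  simp only [chainB, if_pos h1]

lemma pvHalts_mono : ∀ (f : Nat) (n : Int), pvHalts f n = true → pvHalts (f + 1) n = true := by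
  intro f
  induction f with
  | zero =>
    intro n h
    simp only [pvHalts, decide_eq_true_eq] at h
    simp [pvHalts, show ¬ (1 < n) by omega]
  | succ f ih =>
    intro n h
    by_cases h1 : 1 < n
    · rw [pvHalts_step (f + 1) h1]
      rw [pvHalts_step f h1] at h
      exact ih _ h
    · simp [pvHalts, if_neg h1]

lemma pvHalts_le {f g : Nat} (h : f ≤ g) {n : Int} (hh : pvHalts f n = true) :
    pvHalts g n = true := by
  induction g with
  | zero =>
    have hf : f = 0 := by omega
    exact hf ▸ hh
  | succ g ih =>
    rcases Nat.lt_or_ge f (g + 1) with hlt | hge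
    · exact pvHalts_mono g n (ih (by omega))
    · have : f = g + 1 := by omega
      exact this ▸ hh

lemma chainB_stab : ∀ (f : Nat) (n c : Int), pvHalts f n = true → chainB (f + 1) n c = chainB f n c := by
  intro f
  induction f with
  | zero =>
    intro n c h
    simp only [pvHalts, decide_eq_true_eq] at h
    simp [chainB, show ¬ (1 < n) by omega]
  | succ f ih =>
    intro n c h
    by_cases h1 : 1 < n
    · rw [pvHalts_step f h1] at h
      rw [chainB_step (f + 1) h1, chainB_step f h1]
      exact ih _ _ h
    · simp [chainB, if_neg h1]

lemma pvHalts_succ_of {f : Nat} {n : Int} (h : pvHalts f n = true) (h1 : 1 < n) :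
    ∃ g, f = g + 1 ∧ pvHalts g (pvCollatzNext n) = true := by
  cases f with
  | zero => simp only [pvHalts, decide_eq_true_eq] at h; omega
  | succ g =>
    refine ⟨g, rfl, ?_⟩
    rwa [pvHalts_step g h1] at h

lemma LB_even {n : Int} (hh : pvHalts pvFuel n = true) (h1 : 1 < n)
    (he : PySem.Int.mod n 2 = 0) : LB n = LB (PySem.Int.floordiv n 2) + 1 := by
  obtain ⟨g, hg, hgs⟩ := pvHalts_succ_of hh h1
  rw [pvCollatzNext_even he] at hgs
  unfold LB
  rw [hg, chainB_step g h1 1, pvCollatzNext_even he, chainB_stab g _ 1 hgs,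
    chainB_shift g _ (1 + 1), chainB_shift g _ 1]
  ring

lemma LB_odd {n : Int} (hh : pvHalts pvFuel n = true) (h1 : 1 < n)
    (ho : PySem.Int.mod n 2 ≠ 0) : LB n = LB (PySem.Int.floordiv (3 * n + 1) 2) + 2 := by
  have hdvd : ¬ (2 ∣ n) := fun hd => ho ((PySem.Int.mod_eq_zero_iff_dvd n 2).mpr hd)
  have h1' : (1 : Int) < 3 * n + 1 := by omega
  have he' : PySem.Int.mod (3 * n + 1) 2 = 0 :=
    (PySem.Int.mod_eq_zero_iff_dvd _ 2).mpr (by omega)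
  obtain ⟨g, hg, hgs⟩ := pvHalts_succ_of hh h1
  rw [pvCollatzNext_odd ho] at hgs
  obtain ⟨g', hg', hgs'⟩ := pvHalts_succ_of hgs h1'
  rw [pvCollatzNext_even he'] at hgs'
  unfold LB
  rw [hg, hg', chainB_step (g' + 1) h1 1, pvCollatzNext_odd ho,
    chainB_step g' h1' (1 + 1), pvCollatzNext_even he',
    chainB_stab (g' + 1) _ 1 (pvHalts_mono g' _ hgs'), chainB_stab g' _ 1 hgs',
    chainB_shift g' _ (1 + 1 + 1), chainB_shift g' _ 1]
  ring

lemma lcsA_exit {n stop c : Int} (h : ¬ (1 < n ∧ stop < n)) (f : Nat) :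
    lcsA f n stop c = (c, n) := by
  cases f with
  | zero => rfl
  | succ f => simp only [lcsA, if_neg h]

-- loop invariant for length_collatz_seq against the naive chain length
lemma mlA : ∀ (f : Nat), f ≤ pvFuel → ∀ (n stop cnt : Int), pvHalts f n = true →
    1 ≤ stop → stop < n → 1 < n →
    1 ≤ (lcsA f n stop cnt).2 ∧ (lcsA f n stop cnt).2 ≤ stop ∧
      pvHalts pvFuel (lcsA f n stop cnt).2 = true ∧
      (lcsA f n stop cnt).1 + LB (lcsA f n stop cnt).2 = cnt + LB n := by
  intro f
  induction f with
  | zero =>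
    intro _ n stop cnt h _ _ h1
    simp only [pvHalts, decide_eq_true_eq] at h
    omega
  | succ f ih =>
    intro hle n stop cnt h hstop hsn h1
    have hFull : pvHalts pvFuel n = true := pvHalts_le hle h
    have hcond : 1 < n ∧ stop < n := ⟨h1, hsn⟩
    by_cases he : PySem.Int.mod n 2 = 0
    · -- even step
      have hdvd : (2 : Int) ∣ n := (PySem.Int.mod_eq_zero_iff_dvd n 2).mp he
      have hfd : PySem.Int.floordiv n 2 = n / 2 := PySem.Int.floordiv_eq_ediv_of_pos (by norm_num)
      have hhn : pvHalts f (PySem.Int.floordiv n 2) = true := by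
        have hcopy := h
        rw [pvHalts_step f h1, pvCollatzNext_even he] at hcopy
        exact hcopy
      have hLB : LB n = LB (PySem.Int.floordiv n 2) + 1 := LB_even hFull h1 he
      simp only [lcsA, if_pos hcond, beq_iff_eq, if_pos he]
      by_cases hc : 1 < PySem.Int.floordiv n 2 ∧ stop < PySem.Int.floordiv n 2
      · have := ih (by omega) (PySem.Int.floordiv n 2) stop (cnt + 1) hhn hstop hc.2 hc.1
        refine ⟨this.1, this.2.1, this.2.2.1, ?_⟩
        rw [this.2.2.2, hLB]; ring
      · rw [lcsA_exit hc f]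
        have hpos : 1 ≤ PySem.Int.floordiv n 2 := by rw [hfd]; omega
        refine ⟨hpos, by omega, pvHalts_le (show f ≤ pvFuel by omega) hhn, ?_⟩
        simp only [hLB]; ring
    · -- odd step
      have hdvd : ¬ (2 : Int) ∣ n := fun hd => he ((PySem.Int.mod_eq_zero_iff_dvd n 2).mpr hd)
      have hfd : PySem.Int.floordiv (3 * n + 1) 2 = (3 * n + 1) / 2 :=
        PySem.Int.floordiv_eq_ediv_of_pos (by norm_num)
      have hn3 : 3 ≤ n := by omega
      have hbig : n < PySem.Int.floordiv (3 * n + 1) 2 := by rw [hfd]; omega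
      have hhn : pvHalts f (PySem.Int.floordiv (3 * n + 1) 2) = true := by
        have hstep : pvHalts f (3 * n + 1) = true := by
          have hcopy := h
          rw [pvHalts_step f h1, pvCollatzNext_odd he] at hcopy
          exact hcopy
        obtain ⟨g, hg, hgs⟩ := pvHalts_succ_of hstep (by omega)
        have he' : PySem.Int.mod (3 * n + 1) 2 = 0 :=
          (PySem.Int.mod_eq_zero_iff_dvd _ 2).mpr (by omega)
        rw [pvCollatzNext_even he'] at hgs
        exact hg ▸ pvHalts_mono g _ hgs
      have hLB : LB n = LB (PySem.Int.floordiv (3 * n + 1) 2) + 2 := LB_odd hFull h1 he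
      simp only [lcsA, if_pos hcond, beq_iff_eq, if_neg he]
      have := ih (by omega) (PySem.Int.floordiv (3 * n + 1) 2) stop (cnt + 2) hhn hstop
        (by omega) (by omega)
      refine ⟨this.1, this.2.1, this.2.2.1, ?_⟩
      rw [this.2.2.2, hLB]; ring

-- the value A's table holds at index i
def Ltab (i : Nat) : Int := if i = 0 then 0 else LB i

lemma LB_one : LB 1 = 1 := by decide

lemma tabLemma : ∀ (m : Nat), (∀ k : Int, 2 ≤ k → k < 2 + (m : Int) → pvHalts pvFuel k = true) →
    (PySem.List.pyRange 2 (2 + (m : Int)) 1).foldl clStepA [0, 1] = (List.range (m + 2)).map Ltab := by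
  intro m
  induction m with
  | zero =>
    intro _
    rw [show (2 + ((0 : Nat) : Int)) = 2 by norm_num, PySem.List.pyRange_one_eq_nil (by omega)]
    simp [List.range_succ, Ltab, LB_one]
  | succ m ih =>
    intro hh
    have hcast : 2 + ((m + 1 : Nat) : Int) = (2 + (m : Int)) + 1 := by push_cast; ring
    rw [hcast, PySem.List.pyRange_one_succ_right (by omega), List.foldl_append,
      ih (fun k h2 hk => hh k h2 (by omega))]
    simp only [List.foldl_cons, List.foldl_nil]
    set tab := (List.range (m + 2)).map Ltab with htab
    have hlen : tab.length = m + 2 := by simp [htab]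
    have hk2 : (2 : Int) ≤ 2 + (m : Int) := by omega
    have hkN : 2 + (m : Int) < 2 + ((m + 1 : Nat) : Int) := by push_cast; omega
    have hhk : pvHalts pvFuel (2 + (m : Int)) = true := hh _ hk2 (by push_cast; omega)
    have hknat : (2 + (m : Int)) = ((m + 2 : Nat) : Int) := by push_cast; ring
    have hlook : ∀ i : Int, 0 ≤ i → i < ((m + 2 : Nat) : Int) →
        PySem.List.pyGetD tab i 0 = Ltab i.toNat := by
      intro i h0 hi
      rw [PySem.List.pyGetD_eq_getElem tab 0 h0 (by rw [hlen]; exact hi)]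
      simp [htab, List.getElem_map, List.getElem_range]
    have hrange : List.range (m + 1 + 2) = List.range (m + 2) ++ [m + 2] := List.range_succ
    rw [hrange, List.map_append]
    simp only [List.map_cons, List.map_nil]
    by_cases he : PySem.Int.mod (2 + (m : Int)) 2 = 0
    · -- even k
      have hdvd : (2 : Int) ∣ (2 + (m : Int)) := (PySem.Int.mod_eq_zero_iff_dvd _ 2).mp he
      have hfd : PySem.Int.floordiv (2 + (m : Int)) 2 = (2 + (m : Int)) / 2 :=
        PySem.Int.floordiv_eq_ediv_of_pos (by norm_num)
      have h0 : 0 ≤ PySem.Int.floordiv (2 + (m : Int)) 2 := by rw [hfd]; omega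
      have hlt : PySem.Int.floordiv (2 + (m : Int)) 2 < ((m + 2 : Nat) : Int) := by
        rw [hfd]; push_cast; omega
      unfold clStepA
      rw [if_pos (show (PySem.Int.mod (2 + (m : Int)) 2 == 0) = true by simpa using he)]
      rw [hlook _ h0 hlt]
      have hpos : (PySem.Int.floordiv (2 + (m : Int)) 2).toNat ≠ 0 := by rw [hfd]; omega
      have hLB : LB (2 + (m : Int)) = LB (PySem.Int.floordiv (2 + (m : Int)) 2) + 1 :=
        LB_even hhk (by omega) he
      have hLtab : Ltab (m + 2) = LB (2 + (m : Int)) := by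
        simp only [Ltab, if_neg (show m + 2 ≠ 0 by omega)]
        congr 1; push_cast; ring
      have hcastfd : (((PySem.Int.floordiv (2 + (m : Int)) 2).toNat : Nat) : Int) =
          PySem.Int.floordiv (2 + (m : Int)) 2 := by rw [hfd]; omega
      rw [hLtab, hLB]
      simp only [Ltab, if_neg hpos]
      rw [hcastfd]
    · -- odd k
      unfold clStepA
      rw [if_neg (show ¬ (PySem.Int.mod (2 + (m : Int)) 2 == 0) = true by simpa using he)]
      have hml := mlA pvFuel (le_refl _) (2 + (m : Int)) (2 + (m : Int) - 1) 0 hhk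
        (by omega) (by omega) (by omega)
      set p := lcsA pvFuel (2 + (m : Int)) (2 + (m : Int) - 1) 0 with hp
      obtain ⟨hp1, hp2, _, hpeq⟩ := hml
      rw [hlook p.2 (by omega) (by push_cast; omega)]
      have hLtab : Ltab (m + 2) = LB (2 + (m : Int)) := by
        simp only [Ltab, if_neg (show m + 2 ≠ 0 by omega)]
        congr 1; push_cast; ring
      have hLp : Ltab p.2.toNat = LB p.2 := by
        simp only [Ltab, if_neg (show p.2.toNat ≠ 0 by omega)]
        congr 1; omega
      rw [hLp, hLtab]
      congr 2
      omega

-- one chain step on the canonical length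
lemma LB_step {x : Int} (hh : pvHalts pvFuel x = true) (h1 : 1 < x) :
    LB x = LB (pvCollatzNext x) + 1 := by
  obtain ⟨g, hg, hgs⟩ := pvHalts_succ_of hh h1
  unfold LB
  rw [hg, chainB_step g h1 1, chainB_stab g _ 1 hgs,
    chainB_shift g _ (1 + 1), chainB_shift g _ 1]
  ring

lemma pvCollatzNext_pos {n : Int} (h1 : 1 < n) : 1 ≤ pvCollatzNext n := by
  by_cases he : PySem.Int.mod n 2 = 0
  · have hdvd : (2 : Int) ∣ n := (PySem.Int.mod_eq_zero_iff_dvd n 2).mp he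
    have hfd : PySem.Int.floordiv n 2 = n / 2 := PySem.Int.floordiv_eq_ediv_of_pos (by norm_num)
    rw [pvCollatzNext_even he, hfd]; omega
  · rw [pvCollatzNext_odd he]; omega

-- B's memo records only canonical chain lengths (0 = not yet recorded)
def InvM (bnd : Int) (memo : Array Int) : Prop :=
  memo.getD 1 0 = 1 ∧
    ∀ x : Int, 1 ≤ x → x ≤ bnd → memo.getD x.toNat 0 = 0 ∨ memo.getD x.toNat 0 = LB x

-- the abstract per-k step both ports are reduced to
def pureStep (st : List Int × Int) (k : Int) : List Int × Int :=
  if LB k ≥ st.2 then (st.1 ++ [k], LB k) else st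

lemma getD_setIfInBounds_ne {xs : Array Int} {i j : Nat} {a d : Int} (h : i ≠ j) :
    (xs.setIfInBounds i a).getD j d = xs.getD j d := by
  rw [Array.getD_eq_getD_getElem?, Array.getD_eq_getD_getElem?,
    Array.getElem?_setIfInBounds, if_neg h]

lemma getD_setIfInBounds_self {xs : Array Int} {i : Nat} {a d : Int} :
    (xs.setIfInBounds i a).getD i d = if i < xs.size then a else xs.getD i d := by
  rw [Array.getD_eq_getD_getElem?, Array.getElem?_setIfInBounds, if_pos rfl]
  by_cases h : i < xs.size
  · simp [h]
  · simp [h]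

lemma assignB_spec : ∀ (rq : List Int) (bnd : Int) (memo : Array Int) (n : Int),
    InvM bnd memo →
    (∀ p ∈ rq, 1 < p ∧ pvHalts pvFuel p = true) →
    List.IsChain (fun a b => a = pvCollatzNext b) (n :: rq) →
    pvHalts pvFuel n = true →
    InvM bnd (assignB rq bnd memo (LB n)).1 ∧
      (assignB rq bnd memo (LB n)).2 = LB (rq.getLastD n) := by
  intro rq
  induction rq with
  | nil => intro bnd memo n hInv _ _ _; exact ⟨hInv, rfl⟩
  | cons q rest ih =>
    intro bnd memo n hInv hall hchain hn
    obtain ⟨hq1, hqh⟩ := hall q (by simp)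
    have hrel : n = pvCollatzNext q := (List.isChain_cons_cons.mp hchain).1
    have hLBq : LB n + 1 = LB q := by rw [LB_step hqh hq1, ← hrel]
    have hrw : assignB (q :: rest) bnd memo (LB n) =
        assignB rest bnd (if q ≤ bnd then memo.setIfInBounds q.toNat (LB q) else memo) (LB q) := by
      show assignB rest bnd (if q ≤ bnd then memo.setIfInBounds q.toNat (LB n + 1) else memo)
        (LB n + 1) = _
      rw [hLBq]
    rw [hrw]
    have hInv' : InvM bnd (if q ≤ bnd then memo.setIfInBounds q.toNat (LB q) else memo) := by
      by_cases hqb : q ≤ bnd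
      · rw [if_pos hqb]
        refine ⟨?_, ?_⟩
        · rw [getD_setIfInBounds_ne (show q.toNat ≠ 1 by omega)]
          exact hInv.1
        · intro x hx1 hxb
          by_cases hxq : x = q
          · subst hxq
            rw [getD_setIfInBounds_self]
            by_cases hsz : x.toNat < memo.size
            · right; rw [if_pos hsz]
            · rw [if_neg hsz]; exact hInv.2 x hx1 hxb
          · rw [getD_setIfInBounds_ne (show q.toNat ≠ x.toNat by omega)]
            exact hInv.2 x hx1 hxb
      · rw [if_neg hqb]; exact hInv
    have := ih bnd (if q ≤ bnd then memo.setIfInBounds q.toNat (LB q) else memo) q hInv'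
      (fun p hp => hall p (by simp [hp])) (List.isChain_cons_cons.mp hchain).2 hqh
    refine ⟨this.1, ?_⟩
    rw [this.2, List.getLastD_cons]

lemma findB_spec : ∀ (f : Nat), f ≤ pvFuel → ∀ (bnd : Int) (memo : Array Int) (n : Int)
    (path : List Int), 1 ≤ bnd → InvM bnd memo → pvHalts f n = true → 1 ≤ n →
    ∃ q m, findB f bnd memo n path = (path ++ q, m) ∧
      1 ≤ m ∧ memo.getD m.toNat 0 = LB m ∧ pvHalts pvFuel m = true ∧
      (∀ x ∈ q, 1 < x ∧ pvHalts pvFuel x = true) ∧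
      List.IsChain (fun a b => b = pvCollatzNext a) (q ++ [m]) ∧
      q.headD m = n := by
  intro f
  induction f with
  | zero =>
    intro _ bnd memo n path _ hInv hh hn
    simp only [pvHalts, decide_eq_true_eq] at hh
    have hn1 : n = 1 := by omega
    subst hn1
    exact ⟨[], 1, by simp [findB], by omega,
      by rw [show (1 : Int).toNat = 1 from rfl, hInv.1, LB_one],
      pvHalts_le (Nat.zero_le _) (by decide), by simp,
      by simp only [List.nil_append]; exact List.isChain_singleton (R := fun a b => b = pvCollatzNext a) 1, rfl⟩
  | succ f ih =>
    intro hle bnd memo n path hbnd hInv hh hn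
    by_cases hc : bnd < n ∨ memo.getD n.toNat 0 = 0
    · have hne1 : n ≠ 1 := by
        intro he
        rw [he] at hc
        rcases hc with hc | hc
        · omega
        · rw [show (1 : Int).toNat = 1 from rfl, hInv.1] at hc; omega
      have h1n : 1 < n := by omega
      have hstep : pvHalts f (pvCollatzNext n) = true := by
        have hcopy := hh
        rwa [pvHalts_step f h1n] at hcopy
      obtain ⟨q', m, heq, hm1, hmv, hhm, hall, hchain, hhead⟩ :=
        ih (by omega) bnd memo (pvCollatzNext n) (path ++ [n]) hbnd hInv hstep
          (pvCollatzNext_pos h1n)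
      refine ⟨n :: q', m, ?_, hm1, hmv, hhm, ?_, ?_, rfl⟩
      · show findB (f + 1) bnd memo n path = _
        simp only [findB, if_pos hc]
        rw [heq, List.append_assoc]
        rfl
      · intro x hx
        rcases List.mem_cons.mp hx with hx | hx
        · exact hx ▸ ⟨h1n, pvHalts_le hle hh⟩
        · exact hall x hx
      · show List.IsChain _ (n :: (q' ++ [m]))
        rw [List.isChain_cons]
        refine ⟨?_, hchain⟩
        intro y hy
        have : (q' ++ [m]).head? = some (q'.headD m) := by
          cases q' with
          | nil => simp
          | cons a l => simp
        rw [this] at hy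
        injection hy with hy
        rw [← hy, hhead]
    · have hnb : n ≤ bnd := by
        by_contra hgt
        exact hc (Or.inl (by omega))
      have hLBn : memo.getD n.toNat 0 = LB n := by
        rcases hInv.2 n hn hnb with h | h
        · exact absurd h (fun h0 => hc (Or.inr h0))
        · exact h
      refine ⟨[], n, ?_, hn, hLBn, pvHalts_le hle hh, by simp,
        by simp only [List.nil_append];
           exact List.isChain_singleton (R := fun a b => b = pvCollatzNext a) n, rfl⟩
      show findB (f + 1) bnd memo n path = _
      rw [show findB (f + 1) bnd memo n path =
        (if bnd < n ∨ memo.getD n.toNat 0 = 0 then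
          findB f bnd memo (pvCollatzNext n) (path ++ [n]) else (path, n)) from rfl]
      rw [if_neg hc]
      simp

lemma bStep_spec (bnd : Int) (st : Array Int × List Int × Int) (k : Int)
    (hbnd : 1 ≤ bnd) (hInv : InvM bnd st.1) (hk : 2 ≤ k) (hh : pvHalts pvFuel k = true) :
    InvM bnd (bStep bnd st k).1 ∧ (bStep bnd st k).2 = pureStep st.2 k := by
  obtain ⟨q, m, heq, hm1, hmv, hhm, hall, hchain, hhead⟩ :=
    findB_spec pvFuel (le_refl _) bnd st.1 k [] hbnd hInv hh (by omega)
  have hchain' : List.IsChain (fun a b => a = pvCollatzNext b) (m :: q.reverse) := by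
    have : (m :: q.reverse) = (q ++ [m]).reverse := by simp
    rw [this, List.isChain_reverse]
    exact hchain
  have has := assignB_spec q.reverse bnd st.1 m hInv
    (fun p hp => hall p (List.mem_reverse.mp hp)) hchain' hhm
  have hlast : q.reverse.getLastD m = k := by
    rw [List.getLastD_eq_getLast?, List.getLast?_reverse, ← List.headD_eq_head? q m, hhead]
  have hbs : bStep bnd st k =
      (if (assignB q.reverse bnd st.1 (LB m)).2 ≥ st.2.2 then
        ((assignB q.reverse bnd st.1 (LB m)).1, st.2.1 ++ [k],
          (assignB q.reverse bnd st.1 (LB m)).2)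
      else ((assignB q.reverse bnd st.1 (LB m)).1, st.2.1, st.2.2)) := by
    show (let pr := findB pvFuel bnd st.1 k [];
      let ac := assignB pr.1.reverse bnd st.1 (st.1.getD pr.2.toNat 0);
      if ac.2 ≥ st.2.2 then (ac.1, st.2.1 ++ [k], ac.2) else (ac.1, st.2.1, st.2.2)) = _
    rw [heq]
    simp only [List.nil_append]
    rw [hmv]
  have hc : (assignB q.reverse bnd st.1 (LB m)).2 = LB k := by
    rw [has.2, hlast]
  rw [hbs, hc]
  unfold pureStep
  by_cases hge : LB k ≥ st.2.2
  · rw [if_pos hge, if_pos hge]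
    exact ⟨has.1, rfl⟩
  · rw [if_neg hge, if_neg hge]
    exact ⟨has.1, rfl⟩

lemma foldB_spec : ∀ (ks : List Int) (bnd : Int) (st : Array Int × List Int × Int),
    1 ≤ bnd → InvM bnd st.1 →
    (∀ k ∈ ks, 2 ≤ k ∧ pvHalts pvFuel k = true) →
    (ks.foldl (bStep bnd) st).2 = ks.foldl pureStep st.2 := by
  intro ks
  induction ks with
  | nil => intro bnd st _ _ _; rfl
  | cons k rest ih =>
    intro bnd st hbnd hInv hall
    obtain ⟨hk, hh⟩ := hall k (by simp)
    obtain ⟨hInv', hval⟩ := bStep_spec bnd st k hbnd hInv hk hh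
    simp only [List.foldl_cons]
    rw [ih bnd (bStep bnd st k) hbnd hInv' (fun j hj => hall j (by simp [hj])), hval]

lemma InvM_init (N : Int) :
    InvM N ((Array.replicate ((max N 1).toNat + 1) 0).setIfInBounds 1 1) := by
  have h1 : ((Array.replicate ((max N 1).toNat + 1) (0 : Int)).setIfInBounds 1 1).getD 1 0 = 1 := by
    rw [Array.getD_eq_getD_getElem?, Array.getElem?_setIfInBounds, if_pos rfl,
      if_pos (by rw [Array.size_replicate]; omega)]
    rfl
  refine ⟨h1, ?_⟩
  intro x hx1 hxb
  by_cases hx : x = 1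
  · right
    subst hx
    rw [show (1 : Int).toNat = 1 from rfl, h1, LB_one]
  · left
    rw [getD_setIfInBounds_ne (show 1 ≠ x.toNat by omega),
      Array.getD_eq_getD_getElem?, Array.getElem?_replicate]
    by_cases h : x.toNat < (max N 1).toNat + 1
    · simp [h]
    · simp [h]

-- ===== VERDICT (by name: the statement is the Claim_ definition above) =====
theorem max_lengths_spec : Claim_equal_max_lengths := by
  intro N _
  unfold Spec_max_lengths max_lengths max_lengths_alt
  by_cases hg : pvGuard N = true
  · simp only [hg, if_true]
    have hhalts : ∀ k : Int, 2 ≤ k → k < N + 1 → pvHalts pvFuel k = true := by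
      intro k h2 hk
      have hmem : k ∈ PySem.List.pyRange 2 (N + 1) 1 := by
        rw [PySem.List.mem_pyRange_one]; omega
      exact List.all_eq_true.mp hg k hmem
    by_cases hN : N ≤ 1
    · have hnil : PySem.List.pyRange 2 (N + 1) 1 = [] :=
        PySem.List.pyRange_one_eq_nil (by omega)
      unfold clA
      rw [hnil]
      rfl
    · have hfold : ((PySem.List.pyRange 2 (N + 1) 1).foldl (bStep N)
          ((Array.replicate ((max N 1).toNat + 1) 0).setIfInBounds 1 1, [0, 1], 1)).2 =
          (PySem.List.pyRange 2 (N + 1) 1).foldl pureStep ([0, 1], 1) := by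
        refine foldB_spec _ _ _ (by omega) ?_ ?_
        · exact InvM_init N
        · intro k hk
          rw [PySem.List.mem_pyRange_one] at hk
          exact ⟨hk.1, hhalts k hk.1 hk.2⟩
      rw [show ((PySem.List.pyRange 2 (N + 1) 1).foldl (bStep N)
          ((Array.replicate ((max N 1).toNat + 1) 0).setIfInBounds 1 1, [0, 1], 1)).2.1 =
          ((PySem.List.pyRange 2 (N + 1) 1).foldl pureStep ([0, 1], 1)).1 from
        congrArg Prod.fst hfold]
      obtain ⟨m, hm⟩ : ∃ m : Nat, N = 2 + (m : Int) := ⟨(N - 2).toNat, by omega⟩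
      have hrw : N + 1 = 2 + ((m + 1 : Nat) : Int) := by push_cast; omega
      have htab : clA N = (List.range (m + 3)).map Ltab := by
        unfold clA
        rw [hrw, tabLemma (m + 1) (fun k h2 hk => hhalts k h2 (by omega))]
      rw [htab]
      set tab := (List.range (m + 3)).map Ltab with htabdef
      have hlen : tab.length = m + 3 := by simp [htabdef]
      have hlook : ∀ i : Int, 0 ≤ i → i < ((m + 3 : Nat) : Int) →
          PySem.List.pyGetD tab i 0 = Ltab i.toNat := by
        intro i h0 hi
        rw [PySem.List.pyGetD_eq_getElem tab 0 h0 (by rw [hlen]; exact hi)]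
        simp [htabdef, List.getElem_map, List.getElem_range]
      have hlenrw : (tab.length : Int) = 2 + ((m + 1 : Nat) : Int) := by
        rw [hlen]; push_cast; ring
      rw [hlenrw, PySem.List.pyRange_one_cons (by push_cast; omega)]
      simp only [List.foldl_cons]
      have hstep1 : maxStepA tab ([0], 1) 1 = ([0, 1], 1) := by
        unfold maxStepA
        rw [hlook 1 (by omega) (by push_cast; omega)]
        simp [Ltab, LB_one]
      rw [hstep1]
      have hrw2 : (1 : Int) + 1 = 2 := by norm_num
      rw [hrw2, ← hrw]
      refine congrArg Prod.fst (PySem.List.foldl_congr_mem _ _ _ _ ?_)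
      intro st k hk
      rw [PySem.List.mem_pyRange_one] at hk
      have hv : PySem.List.pyGetD tab k 0 = LB k := by
        rw [hlook k (by omega) (by push_cast; omega)]
        simp only [Ltab, if_neg (show k.toNat ≠ 0 by omega)]
        congr 1; omega
      unfold maxStepA pureStep
      rw [hv]
      by_cases heq : LB k = st.2
      · rw [if_pos (show (LB k == st.2) = true by simpa using heq), if_pos (by omega), heq]
      · by_cases hgt : LB k > st.2
        · rw [if_neg (show ¬ (LB k == st.2) = true by simpa using heq), if_pos hgt,
            if_pos (by omega)]
        · rw [if_neg (show ¬ (LB k == st.2) = true by simpa using heq), if_neg hgt,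
            if_neg (by omega)]
  · simp [hg]
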